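-- pv_equiv track=rewrite | github.com/huhaheng/simple_doc_classifier | src/doc_classify_keywords.py | classify_document
-- ===== SOURCE A (Python) =====
-- from typing import Dict, List, Optional, Set, Tuple
--
-- def classify_document(content: str, categories: Dict[str, Dict[str, List[str]]]) -> str:
--     """根据内容分类文档 - 优化版本"""
--     if not content or not content.strip():
--         return 'Others'
--
--     content_lower = content.lower()
--
--     # Early exit optimization: check exclude keywords first for faster rejection
--     for category_name, rules in categories.items():
--         if category_name == 'Others':
--             continue
--
--         exclude_keywords = rules.get('exclude', [])
--
--         # Fast exclude check - if any exclude keyword found, skip this category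
--         if exclude_keywords:
--             exclude_found = False
--             for keyword in exclude_keywords:
--                 if keyword.lower() in content_lower:
--                     exclude_found = True
--                     break
--             if exclude_found:
--                 continue
--
--         # Check include keywords only if no exclude keywords found
--         include_keywords = rules.get('include', [])
--
--         # AND logic: ALL include keywords must be present
--         if include_keywords:
--             all_included = True
--             for keyword in include_keywords:
--                 if keyword.lower() not in content_lower:
--                     all_included = False
--                     break
--             if all_included:
--                 return category_name
--         elif not include_keywords:  # No include keywords means match by exclusion only
--             return category_name
--
--     return 'Others'
-- ===== SOURCE B (Python) =====
-- def classify_document(content: str, categories) -> str: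
--     """Text-driven multi-pattern scan: sweep the text positions once and, at
--     each position, look the candidate substring of each distinct keyword
--     length up in a keyword set; A instead runs one substring search per
--     keyword per category."""
--     if not content or not content.strip():
--         return 'Others'
--     text = content.lower()
--
--     # all keywords (lowered), deduplicated
--     kws = set()
--     for rules in categories.values():
--         for kw in rules.get('exclude', []):
--             kws.add(kw.lower())
--         for kw in rules.get('include', []):
--             kws.add(kw.lower())
--     lengths = {len(k) for k in kws}
--
--     # one sweep over the text: which keywords occur as substrings
--     found = set()
--     for i in range(len(text) + 1):
--         for L in lengths:
--             cand = text[i:i + L]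
--             if len(cand) == L and cand in kws:
--                 found.add(cand)
--
--     # category logic by pure set-membership lookups
--     for name, rules in categories.items():
--         if name == 'Others':
--             continue
--         if any(kw.lower() in found for kw in rules.get('exclude', [])):
--             continue
--         if all(kw.lower() in found for kw in rules.get('include', [])):
--             return name
--     return 'Others'
-- ===== Notes on version B (the rewrite author's own statement) =====
-- stated objective: alternative
-- what changed: B inverts the search: instead of A's one substring search per keyword per category, it makes a single sweep over the text positions, testing the candidate slice of each distinct keyword length against a precomputed keyword set (set-lookup multi-pattern matching), and then decides the category by pure set-membership lookups.
import Mathlib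
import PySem

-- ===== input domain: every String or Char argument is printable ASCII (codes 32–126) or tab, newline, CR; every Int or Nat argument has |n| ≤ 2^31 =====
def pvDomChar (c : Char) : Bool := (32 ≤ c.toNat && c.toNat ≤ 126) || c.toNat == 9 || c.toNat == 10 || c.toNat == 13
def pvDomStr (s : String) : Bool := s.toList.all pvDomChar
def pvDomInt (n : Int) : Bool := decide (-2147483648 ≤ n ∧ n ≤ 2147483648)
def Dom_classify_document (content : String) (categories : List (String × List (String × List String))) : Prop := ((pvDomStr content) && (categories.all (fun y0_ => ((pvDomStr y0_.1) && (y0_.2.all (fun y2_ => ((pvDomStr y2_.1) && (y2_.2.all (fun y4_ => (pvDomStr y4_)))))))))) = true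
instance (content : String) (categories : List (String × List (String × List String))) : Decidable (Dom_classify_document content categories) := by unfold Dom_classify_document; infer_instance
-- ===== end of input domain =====

-- B replaces A's per-keyword substring searches by one sweep over the text positions with a
-- keyword-set lookup per distinct keyword length, then decides the category by set lookups.


-- ===== PORT A =====
-- the category loop of A, with its early-exit inner loops over exclude/include keywords
def pvGoA (cl : String) : List (String × List (String × List String)) → String
  | [] => "Others"
  | (name, rules) :: rest =>
    if name = "Others" then pvGoA cl rest
    else
      let excl := (PySem.Dict.mk rules).getD "exclude" []
      -- 'if exclude_keywords: for …: break' — the early-exit loop is List.any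
      let excludeFound := if excl.isEmpty then false
                          else excl.any (fun kw => PySem.Str.isIn (PySem.Str.lower kw) cl)
      if excludeFound then pvGoA cl rest
      else
        let incl := (PySem.Dict.mk rules).getD "include" []
        if ¬ incl.isEmpty then
          -- 'all_included' early-exit loop is List.all
          if incl.all (fun kw => PySem.Str.isIn (PySem.Str.lower kw) cl) then name
          else pvGoA cl rest
        else name

def classify_document (content : String) (categories : List (String × List (String × List String))) : String :=
  if content = "" ∨ PySem.Str.strip content = "" then "Others"
  else pvGoA (PySem.Str.lower content) categories

-- ===== PORT B =====
-- the keyword-collection loops: kws.add(kw.lower()) over both lists of every category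
def pvKwSet (categories : List (String × List (String × List String))) : PySem.Set String :=
  categories.foldl (fun s nr =>
    ((PySem.Dict.mk nr.2).getD "include" []).foldl
      (fun s kw => PySem.Set.add s (PySem.Str.lower kw))
      (((PySem.Dict.mk nr.2).getD "exclude" []).foldl
        (fun s kw => PySem.Set.add s (PySem.Str.lower kw)) s)) PySem.Set.empty

-- lengths = {len(k) for k in kws}
def pvLengths (kws : List String) : PySem.Set Nat :=
  PySem.Set.ofList (kws.map (fun k => k.toList.length))

-- inner loop body: cand = text[i:i+L]; if len(cand) == L and cand in kws: found.add(cand)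
def pvScanLen (text : String) (kws : PySem.Set String) (i : Nat)
    (f : PySem.Set String) (L : Nat) : PySem.Set String :=
  let cand := PySem.Str.slice text (some (i : Int)) (some ((i : Int) + (L : Int)))
  if PySem.Str.len cand == (L : Int) && PySem.Set.contains kws cand then PySem.Set.add f cand
  else f

-- the sweep: for i in range(len(text)+1): for L in lengths: …
def pvFound (text : String) (kws : PySem.Set String) (lengths : List Nat) : PySem.Set String :=
  (List.range (text.toList.length + 1)).foldl
    (fun f i => lengths.foldl (pvScanLen text kws i) f) PySem.Set.empty

-- the category loop of B: pure set-membership lookups in found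
def pvGoB (found : PySem.Set String) : List (String × List (String × List String)) → String
  | [] => "Others"
  | (name, rules) :: rest =>
    if name = "Others" then pvGoB found rest
    else if ((PySem.Dict.mk rules).getD "exclude" []).any
        (fun kw => PySem.Set.contains found (PySem.Str.lower kw)) then pvGoB found rest
    else if ((PySem.Dict.mk rules).getD "include" []).all
        (fun kw => PySem.Set.contains found (PySem.Str.lower kw)) then name
    else pvGoB found rest

def classify_document_alt (content : String) (categories : List (String × List (String × List String))) : String :=
  if content = "" ∨ PySem.Str.strip content = "" then "Others"
  else
    let text := PySem.Str.lower content
    let kws := pvKwSet categories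
    let found := pvFound text kws (pvLengths kws)
    pvGoB found categories

-- ===== PRECONDITION & SPEC =====
def Spec_classify_document (content : String) (categories : List (String × List (String × List String))) (out : String) : Prop := out = classify_document_alt content categories
instance (content : String) (categories : List (String × List (String × List String))) (out : String) : Decidable (Spec_classify_document content categories out) := by unfold Spec_classify_document; infer_instance

-- ===== CLAIM (what is proved, stated in full; the proofs are below) =====
def Claim_equal_classify_document : Prop := ∀ (content : String) (categories : List (String × List (String × List String))), Dom_classify_document content categories → Spec_classify_document content categories (classify_document content categories)

-- ===== LEMMAS AND PROOFS =====

-- the candidate slice text[i:i+L] is take L (drop i) on the character list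
lemma pvCand_toList (text : String) (i L : Nat) :
    (PySem.Str.slice text (some (i : Int)) (some ((i : Int) + (L : Int)))).toList
      = (text.toList.drop i).take L := by
  rw [PySem.Str.toList_slice, PySem.Chars.slice_eq_listSlice]
  have : ((i : Int) + (L : Int)) = ((i + L : Nat) : Int) := by push_cast; ring
  rw [this, PySem.List.slice_natCast]
  congr 1
  omega

-- membership after the inner loop over the length list
lemma mem_foldl_scan (text : String) (kws : PySem.Set String) (i : Nat)
    (lengths : List Nat) (f : PySem.Set String) (y : String) :
    y ∈ lengths.foldl (pvScanLen text kws i) f ↔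
      y ∈ f ∨ ∃ L ∈ lengths,
        (PySem.Str.len (PySem.Str.slice text (some (i : Int)) (some ((i : Int) + (L : Int))))
            == (L : Int)
          && PySem.Set.contains kws
            (PySem.Str.slice text (some (i : Int)) (some ((i : Int) + (L : Int))))) = true
        ∧ PySem.Str.slice text (some (i : Int)) (some ((i : Int) + (L : Int))) = y := by
  induction lengths generalizing f with
  | nil => simp
  | cons L rest ih =>
    simp only [List.foldl_cons, ih]
    unfold pvScanLen
    by_cases h : (PySem.Str.len (PySem.Str.slice text (some (i : Int)) (some ((i : Int) + (L : Int))))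
        == (L : Int)
      && PySem.Set.contains kws
        (PySem.Str.slice text (some (i : Int)) (some ((i : Int) + (L : Int))))) = true
    · simp only [h, if_true, PySem.Set.mem_add]
      constructor
      · rintro (⟨hy | hy⟩ | ⟨L', hL', hc, he⟩)
        · exact Or.inl hy
        · exact Or.inr ⟨L, by simp, h, hy.symm⟩
        · exact Or.inr ⟨L', by simp [hL'], hc, he⟩
      · rintro (hy | ⟨L', hL', hc, he⟩)
        · exact Or.inl (Or.inl hy)
        · rcases List.mem_cons.mp hL' with rfl | hL'
          · exact Or.inl (Or.inr he.symm)
          · exact Or.inr ⟨L', hL', hc, he⟩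
    · simp only [h]
      rw [Bool.not_eq_true] at h
      constructor
      · rintro (hy | ⟨L', hL', hc, he⟩)
        · exact Or.inl hy
        · exact Or.inr ⟨L', by simp [hL'], hc, he⟩
      · rintro (hy | ⟨L', hL', hc, he⟩)
        · exact Or.inl hy
        · rcases List.mem_cons.mp hL' with rfl | hL''
          · rw [hc] at h; cases h
          · exact Or.inr ⟨L', hL'', hc, he⟩

-- membership after the full sweep over the text positions
lemma mem_foldl_sweep (text : String) (kws : PySem.Set String)
    (lengths : List Nat) (positions : List Nat) (f : PySem.Set String) (y : String) :
    y ∈ positions.foldl (fun f i => lengths.foldl (pvScanLen text kws i) f) f ↔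
      y ∈ f ∨ ∃ i ∈ positions, ∃ L ∈ lengths,
        (PySem.Str.len (PySem.Str.slice text (some (i : Int)) (some ((i : Int) + (L : Int))))
            == (L : Int)
          && PySem.Set.contains kws
            (PySem.Str.slice text (some (i : Int)) (some ((i : Int) + (L : Int))))) = true
        ∧ PySem.Str.slice text (some (i : Int)) (some ((i : Int) + (L : Int))) = y := by
  induction positions generalizing f with
  | nil => simp
  | cons i rest ih =>
    simp only [List.foldl_cons, ih, mem_foldl_scan]
    constructor
    · rintro ((hy | ⟨L, hL, hc, he⟩) | ⟨i', hi', rest'⟩)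
      · exact Or.inl hy
      · exact Or.inr ⟨i, by simp, L, hL, hc, he⟩
      · exact Or.inr ⟨i', by simp [hi'], rest'⟩
    · rintro (hy | ⟨i', hi', L, hL, hc, he⟩)
      · exact Or.inl (Or.inl hy)
      · rcases List.mem_cons.mp hi' with rfl | hi'
        · exact Or.inl (Or.inr ⟨L, hL, hc, he⟩)
        · exact Or.inr ⟨i', hi', L, hL, hc, he⟩

-- found contains a collected keyword exactly when it occurs in the text
lemma mem_pvFound_iff_isIn (text : String) (kws : PySem.Set String) (kw : String)
    (hkw : kw ∈ kws) (hL : kw.toList.length ∈ pvLengths kws) :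
    kw ∈ pvFound text kws (pvLengths kws) ↔ PySem.Str.isIn kw text = true := by
  unfold pvFound
  rw [mem_foldl_sweep]
  constructor
  · rintro (h | ⟨i, _, L, _, _, he⟩)
    · cases h
    · rw [PySem.Str.isIn_eq, ← PySem.Chars.exists_prefix_drop_iff_isIn]
      refine ⟨i, ?_⟩
      have hc := pvCand_toList text i L
      rw [he] at hc
      rw [hc]
      exact List.take_prefix _ _
  · intro hin
    rw [PySem.Str.isIn_eq, ← PySem.Chars.exists_prefix_drop_iff_isIn] at hin
    obtain ⟨j, hj⟩ := hin
    set n := text.toList.length with hn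
    refine Or.inr ⟨min j n, ?_, kw.toList.length, hL, ?_⟩
    · simp only [List.mem_range]; omega
    · have hpre : kw.toList <+: text.toList.drop (min j n) := by
        by_cases hjn : j ≤ n
        · have : min j n = j := by omega
          rw [this]; exact hj
        · have hnil : text.toList.drop j = [] := by
            apply List.drop_eq_nil_of_le; omega
          rw [hnil] at hj
          have := List.prefix_nil.mp hj
          rw [this]; exact List.nil_prefix
      have hcand : PySem.Str.slice text (some ((min j n : Nat) : Int))
          (some (((min j n : Nat) : Int) + (kw.toList.length : Int))) = kw := by
        have h1 := pvCand_toList text (min j n) kw.toList.length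
        have h2 : (text.toList.drop (min j n)).take kw.toList.length = kw.toList :=
          (List.prefix_iff_eq_take.mp hpre).symm
        -- strings with equal character lists are equal
        have : (PySem.Str.slice text (some ((min j n : Nat) : Int))
            (some (((min j n : Nat) : Int) + (kw.toList.length : Int)))).toList = kw.toList := by
          rw [h1, h2]
        exact String.ext (by simpa [String.toList] using this)
      refine ⟨?_, hcand⟩
      rw [hcand]
      simp only [Bool.and_eq_true, beq_iff_eq]
      refine ⟨by rw [PySem.Str.len_eq], ?_⟩
      simpa [PySem.Set.contains, List.contains_iff_mem] using hkw

-- the keyword-adding folds only grow the set …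
lemma mem_foldl_add_mono {l : List String} {s : PySem.Set String} {x : String}
    (hx : x ∈ s) : x ∈ l.foldl (fun s kw => PySem.Set.add s (PySem.Str.lower kw)) s := by
  induction l generalizing s with
  | nil => exact hx
  | cons a t ih =>
    simp only [List.foldl_cons]
    exact ih (by rw [PySem.Set.mem_add]; exact Or.inl hx)

-- … and contain each keyword they lower and add
lemma mem_foldl_add_self {l : List String} {s : PySem.Set String} {kw : String}
    (hkw : kw ∈ l) : PySem.Str.lower kw ∈ l.foldl (fun s kw => PySem.Set.add s (PySem.Str.lower kw)) s := by
  induction l generalizing s with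
  | nil => cases hkw
  | cons a t ih =>
    simp only [List.foldl_cons]
    rcases List.mem_cons.mp hkw with rfl | h
    · exact mem_foldl_add_mono (by rw [PySem.Set.mem_add]; exact Or.inr rfl)
    · exact ih h

-- the whole category fold only grows the set
lemma mem_pvKwSet_fold_mono (categories : List (String × List (String × List String)))
    (s : PySem.Set String) (x : String) (hx : x ∈ s) :
    x ∈ categories.foldl (fun s nr =>
      ((PySem.Dict.mk nr.2).getD "include" []).foldl
        (fun s kw => PySem.Set.add s (PySem.Str.lower kw))
        (((PySem.Dict.mk nr.2).getD "exclude" []).foldl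
          (fun s kw => PySem.Set.add s (PySem.Str.lower kw)) s)) s := by
  induction categories generalizing s with
  | nil => exact hx
  | cons c rest ih =>
    simp only [List.foldl_cons]
    exact ih _ (mem_foldl_add_mono (mem_foldl_add_mono hx))

-- every keyword of every category ends up (lowered) in the collected keyword set
lemma mem_pvKwSet (categories : List (String × List (String × List String)))
    (nr : String × List (String × List String)) (hnr : nr ∈ categories) (kw : String)
    (hkw : kw ∈ (PySem.Dict.mk nr.2).getD "exclude" [] ++ (PySem.Dict.mk nr.2).getD "include" []) :
    PySem.Str.lower kw ∈ pvKwSet categories := by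
  unfold pvKwSet
  generalize PySem.Set.empty = s
  induction categories generalizing s with
  | nil => cases hnr
  | cons c rest ih =>
    simp only [List.foldl_cons]
    rcases List.mem_cons.mp hnr with rfl | h
    · refine mem_pvKwSet_fold_mono rest _ _ ?_
      rcases List.mem_append.mp hkw with h | h
      · exact mem_foldl_add_mono (mem_foldl_add_self h)
      · exact mem_foldl_add_self h
    · exact ih h _

-- B's presence lookups compute A's substring tests for the category keywords
lemma pvPresence_eq (cl : String) (categories : List (String × List (String × List String)))
    (nr : String × List (String × List String)) (hnr : nr ∈ categories) (kw : String)
    (hkw : kw ∈ (PySem.Dict.mk nr.2).getD "exclude" [] ++ (PySem.Dict.mk nr.2).getD "include" []) :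
    PySem.Set.contains (pvFound cl (pvKwSet categories) (pvLengths (pvKwSet categories)))
        (PySem.Str.lower kw)
      = PySem.Str.isIn (PySem.Str.lower kw) cl := by
  have hmem : PySem.Str.lower kw ∈ pvKwSet categories := mem_pvKwSet categories nr hnr kw hkw
  have hlen : (PySem.Str.lower kw).toList.length ∈ pvLengths (pvKwSet categories) := by
    rw [pvLengths, PySem.Set.mem_ofList]
    exact List.mem_map.mpr ⟨_, hmem, rfl⟩
  have h := mem_pvFound_iff_isIn cl (pvKwSet categories) (PySem.Str.lower kw) hmem hlen
  by_cases hin : PySem.Str.isIn (PySem.Str.lower kw) cl = true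
  · rw [hin]
    simpa [PySem.Set.contains, List.contains_iff_mem] using h.mpr hin
  · rw [Bool.not_eq_true] at hin
    rw [hin]
    have hno : PySem.Str.lower kw ∉ pvFound cl (pvKwSet categories) (pvLengths (pvKwSet categories)) := by
      intro hmem'
      rw [h] at hmem'
      rw [hmem'] at hin; cases hin
    simpa [PySem.Set.contains, List.contains_iff_mem] using hno

-- Bool all-congruence under membership (no PySem/Mathlib lemma closes this Bool form)
lemma pv_all_congr_mem {α : Type} {l : List α} {p q : α → Bool}
    (h : ∀ x ∈ l, p x = q x) : l.all p = l.all q := by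
  induction l with
  | nil => rfl
  | cons a t ih =>
    simp only [List.all_cons, h a (by simp), ih (fun x hx => h x (List.mem_cons_of_mem _ hx))]

-- A's category loop equals B's, given that found answers presence for cats' keywords
lemma pvGoA_eq_pvGoB (cl : String) (found : PySem.Set String)
    (cats : List (String × List (String × List String)))
    (hpres : ∀ nr ∈ cats, ∀ kw ∈ (PySem.Dict.mk nr.2).getD "exclude" [] ++ (PySem.Dict.mk nr.2).getD "include" [],
      PySem.Set.contains found (PySem.Str.lower kw) = PySem.Str.isIn (PySem.Str.lower kw) cl) :
    pvGoA cl cats = pvGoB found cats := by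
  induction cats with
  | nil => rfl
  | cons nr rest ih =>
    obtain ⟨name, rules⟩ := nr
    have hrest : ∀ nr ∈ rest, ∀ kw ∈ (PySem.Dict.mk nr.2).getD "exclude" [] ++ (PySem.Dict.mk nr.2).getD "include" [],
        PySem.Set.contains found (PySem.Str.lower kw) = PySem.Str.isIn (PySem.Str.lower kw) cl :=
      fun nr h kw hkw => hpres nr (List.mem_cons_of_mem _ h) kw hkw
    have hEq := ih hrest
    have hany : ((PySem.Dict.mk rules).getD "exclude" []).any
          (fun kw => PySem.Set.contains found (PySem.Str.lower kw))
        = ((PySem.Dict.mk rules).getD "exclude" []).any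
          (fun kw => PySem.Str.isIn (PySem.Str.lower kw) cl) :=
      PySem.List.any_congr_mem
        (fun kw hkw => hpres (name, rules) (by simp) kw (List.mem_append_left _ hkw))
    have hall : ((PySem.Dict.mk rules).getD "include" []).all
          (fun kw => PySem.Set.contains found (PySem.Str.lower kw))
        = ((PySem.Dict.mk rules).getD "include" []).all
          (fun kw => PySem.Str.isIn (PySem.Str.lower kw) cl) :=
      pv_all_congr_mem
        (fun kw hkw => hpres (name, rules) (by simp) kw (List.mem_append_right _ hkw))
    by_cases hname : name = "Others"
    · simp only [pvGoA, pvGoB, hname, if_true]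
      exact hEq
    · by_cases hA : ((PySem.Dict.mk rules).getD "exclude" []).any
          (fun kw => PySem.Str.isIn (PySem.Str.lower kw) cl) = true
      · have hne : ((PySem.Dict.mk rules).getD "exclude" []).isEmpty = false := by
          cases hx : (PySem.Dict.mk rules).getD "exclude" [] with
          | nil => rw [hx] at hA; simp at hA
          | cons a t => rfl
        simp only [pvGoA, pvGoB, hname, if_false, hne, hany, hA]
        simp only [Bool.false_eq_true, if_false, if_true]
        exact hEq
      · have hA' : ((PySem.Dict.mk rules).getD "exclude" []).any
            (fun kw => PySem.Str.isIn (PySem.Str.lower kw) cl) = false :=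
          Bool.eq_false_iff.mpr hA
        by_cases hI : ((PySem.Dict.mk rules).getD "include" []).all
            (fun kw => PySem.Str.isIn (PySem.Str.lower kw) cl) = true
        · simp only [pvGoA, pvGoB, hname, hany, hall, hA', hI]
          by_cases hie : ((PySem.Dict.mk rules).getD "include" []).isEmpty = true
          · simp [hie]
          · simp [hie]
        · have hI' : ((PySem.Dict.mk rules).getD "include" []).all
              (fun kw => PySem.Str.isIn (PySem.Str.lower kw) cl) = false :=
            Bool.eq_false_iff.mpr hI
          have hie : ((PySem.Dict.mk rules).getD "include" []).isEmpty = false := by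
            cases hx : (PySem.Dict.mk rules).getD "include" [] with
            | nil => rw [hx] at hI'; simp at hI'
            | cons a t => rfl
          simp only [pvGoA, pvGoB, hname, hany, hall, hA', hI', hie]
          simp only [Bool.false_eq_true, if_false, ite_self]
          exact hEq

-- ===== VERDICT (by name: the statement is the Claim_ definition above) =====
theorem classify_document_spec : Claim_equal_classify_document := by
  intro content categories _
  unfold Spec_classify_document classify_document classify_document_alt
  by_cases hcond : content = "" ∨ PySem.Str.strip content = ""
  · simp [hcond]
  · simp only [hcond, if_false]
    exact pvGoA_eq_pvGoB (PySem.Str.lower content) _ categories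
      (fun nr h kw hkw => pvPresence_eq (PySem.Str.lower content) categories nr h kw hkw)
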